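-- pv_equiv track=rewrite | github.com/MrBrantCode/unitest_baseline | mut_generate/mist_train_cf/cf_18971/solution.py | are_strings_equal
-- ===== SOURCE A (Python) =====
-- def are_strings_equal(string1, string2):
--     # Remove leading and trailing whitespace characters
--     string1 = string1.strip()
--     string2 = string2.strip()
--
--     # Check if the lengths of the strings are equal
--     if len(string1) != len(string2):
--         return False
--
--     # Check if the strings are equal character by character
--     for char1, char2 in zip(string1, string2):
--         # Check if the characters are alphanumeric or special characters
--         if not (char1.isalnum() or char1 in "!@#$%^&*()") or not (char2.isalnum() or char2 in "!@#$%^&*()"):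
--             return False
--
--         # Check if the characters are equal
--         if char1 != char2:
--             return False
--
--     # If all checks pass, return True
--     return True
-- ===== SOURCE B (Python) =====
-- def are_strings_equal(string1, string2):
--     s1 = string1.strip()
--     if s1 != string2.strip():
--         return False
--     return all(c.isalnum() or c in "!@#$%^&*()" for c in s1)
-- ===== Notes on version B (the rewrite author's own statement) =====
-- stated objective: simpler
-- what changed: Replaces the single zip-loop that interleaves per-character validity and equality checks (after an explicit length test) by two differently-shaped passes: one built-in string comparison of the stripped strings, then a separate all() validity scan over the (now known equal) string.
import Mathlib
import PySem

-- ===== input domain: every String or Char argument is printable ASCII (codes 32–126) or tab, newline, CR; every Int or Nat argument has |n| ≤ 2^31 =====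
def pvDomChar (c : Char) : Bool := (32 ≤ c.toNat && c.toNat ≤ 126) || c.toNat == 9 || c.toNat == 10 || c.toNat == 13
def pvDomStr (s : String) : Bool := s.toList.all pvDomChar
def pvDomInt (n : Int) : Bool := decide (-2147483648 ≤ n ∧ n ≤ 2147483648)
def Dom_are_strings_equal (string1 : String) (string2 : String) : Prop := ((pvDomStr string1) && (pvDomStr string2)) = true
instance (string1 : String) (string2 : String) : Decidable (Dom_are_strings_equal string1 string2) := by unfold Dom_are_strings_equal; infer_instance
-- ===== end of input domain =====

-- B replaces A's combined zip-loop (validity + equality per character, after a length test)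
-- by one built-in comparison of the stripped strings followed by a separate validity scan: simpler decomposition.

-- ===== PORT A =====
-- per-character test shared by both ports: char.isalnum() or char in "!@#$%^&*()"
def validChar (c : Char) : Bool := PySem.Chars.isalnum c || "!@#$%^&*()".toList.contains c

-- the 'for char1, char2 in zip(...)' loop with its early returns
def aZipLoop : List (Char × Char) → Bool
  | [] => true
  | (c1, c2) :: rest =>
    if !(validChar c1) || !(validChar c2) then false
    else if c1 ≠ c2 then false
    else aZipLoop rest

def are_strings_equal (string1 : String) (string2 : String) : Bool :=
  let s1 := PySem.Str.strip string1
  let s2 := PySem.Str.strip string2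
  if PySem.Str.len s1 ≠ PySem.Str.len s2 then false
  else aZipLoop (s1.toList.zip s2.toList)

-- ===== PORT B =====
def are_strings_equal_alt (string1 : String) (string2 : String) : Bool :=
  let s1 := PySem.Str.strip string1
  if s1 ≠ PySem.Str.strip string2 then false
  else s1.toList.all validChar

-- ===== PRECONDITION & SPEC =====
def Spec_are_strings_equal (string1 : String) (string2 : String) (out : Bool) : Prop := out = are_strings_equal_alt string1 string2
instance (string1 : String) (string2 : String) (out : Bool) : Decidable (Spec_are_strings_equal string1 string2 out) := by unfold Spec_are_strings_equal; infer_instance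

-- ===== CLAIM (what is proved, stated in full; the proofs are below) =====
def Claim_equal_are_strings_equal : Prop := ∀ (string1 : String) (string2 : String), Dom_are_strings_equal string1 string2 → Spec_are_strings_equal string1 string2 (are_strings_equal string1 string2)

-- ===== LEMMAS AND PROOFS =====

-- A's loop on two equal-length lists decides "lists equal and every char valid"
theorem aZipLoop_eq (l1 l2 : List Char) (h : l1.length = l2.length) :
    aZipLoop (l1.zip l2) = (decide (l1 = l2) && l1.all validChar) := by
  induction l1 generalizing l2 with
  | nil =>
    cases l2 with
    | nil => simp [aZipLoop]
    | cons c r => simp at h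
  | cons c1 r1 ih =>
    cases l2 with
    | nil => simp at h
    | cons c2 r2 =>
      simp only [List.length_cons, Nat.add_right_cancel_iff] at h
      rw [List.zip_cons_cons]
      by_cases hc : c1 = c2
      · subst hc
        by_cases hv1 : validChar c1 = true
        · simp [aZipLoop, hv1, ih r2 h]
        · simp [aZipLoop, hv1]
      · simp [aZipLoop, hc]

-- the bodies of the two ports agree on any pair of (stripped) strings
theorem body_eq (t1 t2 : String) :
    (if PySem.Str.len t1 ≠ PySem.Str.len t2 then false
     else aZipLoop (t1.toList.zip t2.toList))
  = (if t1 ≠ t2 then false else t1.toList.all validChar) := by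
  by_cases he : t1 = t2
  · subst he
    rw [aZipLoop_eq t1.toList t1.toList rfl, if_neg (by simp : ¬ PySem.Str.len t1 ≠ PySem.Str.len t1),
      if_neg (by simp : ¬ t1 ≠ t1)]
    simp only [decide_true, Bool.true_and]
  · have hne : t1.toList ≠ t2.toList := fun h => he (String.toList_inj.mp h)
    by_cases hl : t1.toList.length = t2.toList.length
    · simp [PySem.Str.len_eq, hl, aZipLoop_eq _ _ hl, hne, he]
    · simp only [PySem.Str.len_eq, ne_eq, Nat.cast_inj]
      rw [if_pos hl, if_pos he]

-- ===== VERDICT (by name: the statement is the Claim_ definition above) =====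
theorem are_strings_equal_spec : Claim_equal_are_strings_equal := by
  intro string1 string2 _
  unfold Spec_are_strings_equal are_strings_equal are_strings_equal_alt
  exact body_eq (PySem.Str.strip string1) (PySem.Str.strip string2)
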